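-- pv_equiv track=rewrite | github.com/Phabes/Algorithms_and_Data_Structures | ZESTAWY/ZESTAW_8/zad2_1.py | universalOutfall
-- ===== SOURCE A (Python) =====
-- def universalOutfall(G):
--   n = len(G)
--   for i in range(n):
--     found = True
--     for j in range(n):
--       if i != j and (G[i][j] == 1 or G[j][i] == 0):
--         found = False
--         break
--     if found:
--       return i
--   return None
-- ===== SOURCE B (Python) =====
-- def universalOutfall(G):
--   n = len(G)
--   bad = set()
--   for i in range(n):
--     row = G[i]
--     for j in range(n):
--       if i != j:
--         x = row[j]
--         if x == 1:
--           bad.add(i)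
--         if x == 0:
--           bad.add(j)
--   for i in range(n):
--     if i not in bad:
--       return i
--   return None
-- ===== Notes on version B (the rewrite author's own statement) =====
-- stated objective: alternative
-- what changed: A checks each candidate vertex with an inner verification loop and early break; B makes one flat pass over the matrix marking every vertex disqualified by an entry (a 1 in its row or a 0 in its column) into a 'bad' set, then returns the first unmarked index.
-- outside the precondition, e.g. on universalOutfall([[-1, 1041, 9], [9], [-1, 23]]): A returns 0, B raises IndexError; on universalOutfall([[0, 1], [0]]): A returns 1, B returns 1
import Mathlib
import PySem

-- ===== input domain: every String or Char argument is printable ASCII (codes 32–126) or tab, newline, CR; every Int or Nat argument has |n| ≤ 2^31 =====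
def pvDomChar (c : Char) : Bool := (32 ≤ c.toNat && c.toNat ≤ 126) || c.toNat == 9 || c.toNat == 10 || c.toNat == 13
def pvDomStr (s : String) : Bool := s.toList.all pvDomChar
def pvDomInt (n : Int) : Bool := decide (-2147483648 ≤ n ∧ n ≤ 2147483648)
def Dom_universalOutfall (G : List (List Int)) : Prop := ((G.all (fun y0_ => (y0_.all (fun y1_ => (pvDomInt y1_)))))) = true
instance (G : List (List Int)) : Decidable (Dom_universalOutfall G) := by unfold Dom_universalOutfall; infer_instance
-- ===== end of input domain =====

-- B replaces A's per-candidate verification loop (with early break) by one flat pass that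
-- marks every disqualified vertex into a set, then returns the first unmarked index; same
-- O(n^2) cost, different structure.

-- G[i][j]: exact inside Pre_ (all indices in range there; the getD defaults are never used).
def pvGet (G : List (List Int)) (i j : Int) : Int :=
  (PySem.List.pyGet? ((PySem.List.pyGet? G i).getD []) j).getD 0

-- ===== PORT A =====
-- inner 'for j in range(n)' with break: returns the final value of 'found'
def pvAInner (G : List (List Int)) (i : Int) : List Int → Bool
  | [] => true
  | j :: js =>
      if i ≠ j ∧ (pvGet G i j = 1 ∨ pvGet G j i = 0) then false
      else pvAInner G i js

-- outer 'for i in range(n)' with early return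
def pvAOuter (G : List (List Int)) (r : List Int) : List Int → Option Int
  | [] => none
  | i :: is => if pvAInner G i r then some i else pvAOuter G r is

def universalOutfall (G : List (List Int)) : Option Int :=
  pvAOuter G (PySem.List.pyRange 0 (G.length : Int) 1) (PySem.List.pyRange 0 (G.length : Int) 1)

-- ===== PORT B =====
-- inner 'for j in range(n)': mark i if row[j]==1, mark j if row[j]==0
def pvMarkRow (G : List (List Int)) (i : Int) : List Int → PySem.Set Int → PySem.Set Int
  | [], bad => bad
  | j :: js, bad =>
      pvMarkRow G i js
        (if i ≠ j then
          (let x := pvGet G i j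
           let bad1 := if x = 1 then PySem.Set.add bad i else bad
           if x = 0 then PySem.Set.add bad1 j else bad1)
         else bad)

-- outer 'for i in range(n)' building bad
def pvMarkAll (G : List (List Int)) (r : List Int) : List Int → PySem.Set Int → PySem.Set Int
  | [], bad => bad
  | i :: is, bad => pvMarkAll G r is (pvMarkRow G i r bad)

-- final 'for i in range(n): if i not in bad: return i'
def pvScan (bad : PySem.Set Int) : List Int → Option Int
  | [] => none
  | i :: is => if PySem.Set.contains bad i then pvScan bad is else some i

def universalOutfall_alt (G : List (List Int)) : Option Int :=
  pvScan
    (pvMarkAll G (PySem.List.pyRange 0 (G.length : Int) 1)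
      (PySem.List.pyRange 0 (G.length : Int) 1) PySem.Set.empty)
    (PySem.List.pyRange 0 (G.length : Int) 1)

-- ===== PRECONDITION & SPEC =====
-- Pre_ excludes ragged matrices (a row shorter than len(G)), on which the Python A can raise
-- IndexError; on a few such inputs A still returns early before reaching the short row — those
-- are excluded too (see cites).
def Pre_universalOutfall (G : List (List Int)) : Prop :=
  ∀ row ∈ G, G.length ≤ row.length
instance (G : List (List Int)) : Decidable (Pre_universalOutfall G) := by
  unfold Pre_universalOutfall; infer_instance

def pvWitness_universalOutfall : List (List Int) := [[0, 0], [1, 0]]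

def Spec_universalOutfall (G : List (List Int)) (out : Option Int) : Prop := out = universalOutfall_alt G
instance (G : List (List Int)) (out : Option Int) : Decidable (Spec_universalOutfall G out) := by unfold Spec_universalOutfall; infer_instance

-- ===== CLAIM (what is proved, stated in full; the proofs are below) =====
def Claim_equal_universalOutfall : Prop := ∀ (G : List (List Int)), Dom_universalOutfall G → Pre_universalOutfall G → Spec_universalOutfall G (universalOutfall G)

-- ===== LEMMAS AND PROOFS =====

-- A's inner loop succeeds iff no j in the list disqualifies i
theorem pvAInner_iff (G : List (List Int)) (i : Int) (l : List Int) :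
    pvAInner G i l = true ↔
      ∀ j ∈ l, ¬ (i ≠ j ∧ (pvGet G i j = 1 ∨ pvGet G j i = 0)) := by
  induction l with
  | nil => simp [pvAInner]
  | cons j js ih =>
      simp only [pvAInner]
      split_ifs with h
      · simp only [false_iff]
        intro hall; exact hall j (by simp) h
      · rw [ih]
        constructor
        · intro hall b hb
          rcases List.mem_cons.mp hb with rfl | hb
          · exact h
          · exact hall b hb
        · intro hall b hb; exact hall b (by simp [hb])

-- membership after marking one row
theorem pvMarkRow_mem (G : List (List Int)) (i : Int) (l : List Int)
    (bad : PySem.Set Int) (x : Int) :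
    x ∈ pvMarkRow G i l bad ↔
      x ∈ bad ∨ ∃ j ∈ l, i ≠ j ∧
        ((pvGet G i j = 1 ∧ x = i) ∨ (pvGet G i j = 0 ∧ x = j)) := by
  induction l generalizing bad with
  | nil => simp [pvMarkRow]
  | cons j js ih =>
      have step : ∀ (b : PySem.Set Int),
          x ∈ (if i ≠ j then
                 (let v := pvGet G i j
                  let b1 := if v = 1 then PySem.Set.add b i else b
                  if v = 0 then PySem.Set.add b1 j else b1)
               else b) ↔
            x ∈ b ∨ (i ≠ j ∧ ((pvGet G i j = 1 ∧ x = i) ∨ (pvGet G i j = 0 ∧ x = j))) := by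
        intro b
        split_ifs with hij
        · rcases eq_or_ne (pvGet G i j) 1 with h1 | h1 <;>
            rcases eq_or_ne (pvGet G i j) 0 with h0 | h0
          · exact absurd (h1 ▸ h0) (by norm_num)
          · simp only [h1]
            norm_num [PySem.Set.mem_add, hij]
          · simp only [h0]
            norm_num [PySem.Set.mem_add, hij]
          · simp only [if_neg h1, if_neg h0]
            tauto
        · tauto
      simp only [pvMarkRow, ih, step]
      constructor
      · rintro ((hb | hc) | ⟨b, hb, hc⟩)
        · exact Or.inl hb
        · exact Or.inr ⟨j, by simp, hc⟩
        · exact Or.inr ⟨b, by simp [hb], hc⟩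
      · rintro (hb | ⟨b, hb, hc⟩)
        · exact Or.inl (Or.inl hb)
        · rcases List.mem_cons.mp hb with rfl | hb
          · exact Or.inl (Or.inr hc)
          · exact Or.inr ⟨b, hb, hc⟩

-- membership after marking all rows
theorem pvMarkAll_mem (G : List (List Int)) (r l : List Int)
    (bad : PySem.Set Int) (x : Int) :
    x ∈ pvMarkAll G r l bad ↔
      x ∈ bad ∨ ∃ i ∈ l, ∃ j ∈ r, i ≠ j ∧
        ((pvGet G i j = 1 ∧ x = i) ∨ (pvGet G i j = 0 ∧ x = j)) := by
  induction l generalizing bad with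
  | nil => simp [pvMarkAll]
  | cons i is ih =>
      simp only [pvMarkAll, ih, pvMarkRow_mem]
      constructor
      · rintro ((hb | ⟨j, hj, h⟩) | ⟨a, ha, h⟩)
        · exact Or.inl hb
        · exact Or.inr ⟨i, by simp, j, hj, h⟩
        · exact Or.inr ⟨a, by simp [ha], h⟩
      · rintro (hb | ⟨a, ha, j, hj, h⟩)
        · exact Or.inl (Or.inl hb)
        · rcases List.mem_cons.mp ha with rfl | ha
          · exact Or.inl (Or.inr ⟨j, hj, h⟩)
          · exact Or.inr ⟨a, ha, j, hj, h⟩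

-- the pairwise marking over the full range is exactly failure of A's sink test
theorem pvBad_iff_notInner (G : List (List Int)) (r : List Int) (i : Int) (hi : i ∈ r) :
    (∃ a ∈ r, ∃ b ∈ r, a ≠ b ∧
        ((pvGet G a b = 1 ∧ i = a) ∨ (pvGet G a b = 0 ∧ i = b))) ↔
      ∃ j ∈ r, i ≠ j ∧ (pvGet G i j = 1 ∨ pvGet G j i = 0) := by
  constructor
  · rintro ⟨a, ha, b, hb, hab, ⟨h1, rfl⟩ | ⟨h0, rfl⟩⟩
    · exact ⟨b, hb, hab, Or.inl h1⟩
    · exact ⟨a, ha, fun h => hab h.symm, Or.inr h0⟩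
  · rintro ⟨j, hj, hij, h1 | h0⟩
    · exact ⟨i, hi, j, hj, hij, Or.inl ⟨h1, rfl⟩⟩
    · exact ⟨j, hj, i, hi, fun h => hij h.symm, Or.inr ⟨h0, rfl⟩⟩

-- the two scans agree pointwise
theorem pvScan_eq (G : List (List Int)) (r : List Int) (bad : PySem.Set Int)
    (l : List Int)
    (h : ∀ i ∈ l, (pvAInner G i r = true ↔ i ∉ bad)) :
    pvAOuter G r l = pvScan bad l := by
  induction l with
  | nil => rfl
  | cons i is ih =>
      have hi := h i (by simp)
      have ihis := ih (fun a ha => h a (by simp [ha]))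
      by_cases hm : i ∈ bad
      · have ht : pvAInner G i r = false := by
          cases ht' : pvAInner G i r
          · rfl
          · exact absurd hm (hi.mp ht')
        have hc : PySem.Set.contains bad i = true := by
          simpa [PySem.Set.contains_iff] using hm
        simp only [pvAOuter, pvScan, ht, hc, Bool.false_eq_true, if_false, if_true]
        exact ihis
      · have ht : pvAInner G i r = true := hi.mpr hm
        have hc : ¬ (PySem.Set.contains bad i = true) := by
          simp [hm]
        rw [pvAOuter, pvScan, if_pos ht, if_neg hc]

-- ===== VERDICT (by name: the statement is the Claim_ definition above) =====
theorem universalOutfall_spec : Claim_equal_universalOutfall := by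
  intro G _hDom _hPre
  unfold Spec_universalOutfall universalOutfall universalOutfall_alt
  apply pvScan_eq
  intro i hi
  rw [pvAInner_iff, pvMarkAll_mem]
  simp only [PySem.Set.empty, List.not_mem_nil, false_or]
  rw [pvBad_iff_notInner G _ i hi]
  constructor
  · rintro h ⟨j, hj, hc⟩; exact h j hj hc
  · intro h j hj hc; exact h ⟨j, hj, hc⟩
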